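-- pv_equiv track=rewrite | github.com/ngoolglory/Algorithm | SSAFY/S_string/num_of_words.py | calcualte_num_of_words
-- ===== SOURCE A (Python) =====
-- def calcualte_num_of_words(s1, s2):
--     max_cnt = 0  # s1에 있는 어떤 문자가 s2에 존재하는 갯수의 최대치
--     cnt_dict = {}
--     # s1에 있는 문자들을 cnt_dict의 key로 넣고, value는 0으로 설정
--     for key in set(s1):
--         cnt_dict.update({key:0})
--
--     for ch in s2:                       # s2에 있는 문자 순회
--         cnt = cnt_dict.get(ch, -1)      # s2에 있는 문자가 딕셔너리에 key로 존재하지 않으면 -1을 cnt에 할당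
--         if cnt != -1:                   # 이번 문자가 딕셔너리에 key로 존재하면
--             cnt_dict[ch] += 1           # 해당 키의 값을 1 올리고
--             if max_cnt < cnt_dict[ch]:  # 기존 갯수 최대치보다 크면
--                 max_cnt = cnt_dict[ch]  # 최대치 갱신
--
--     return max_cnt
-- ===== SOURCE B (Python) =====
-- def calcualte_num_of_words(s1, s2):
--     # count each character of set(s1) in s2 separately, then reduce with max
--     return max((sum(1 for c in s2 if c == ch) for ch in set(s1)), default=0)
-- ===== Notes on version B (the rewrite author's own statement) =====
-- stated objective: simpler
-- what changed: Replaces A's mutable count-dictionary with an interleaved running max by a one-line per-character count over set(s1) followed by a separate max reduction with default 0.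
import Mathlib
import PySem

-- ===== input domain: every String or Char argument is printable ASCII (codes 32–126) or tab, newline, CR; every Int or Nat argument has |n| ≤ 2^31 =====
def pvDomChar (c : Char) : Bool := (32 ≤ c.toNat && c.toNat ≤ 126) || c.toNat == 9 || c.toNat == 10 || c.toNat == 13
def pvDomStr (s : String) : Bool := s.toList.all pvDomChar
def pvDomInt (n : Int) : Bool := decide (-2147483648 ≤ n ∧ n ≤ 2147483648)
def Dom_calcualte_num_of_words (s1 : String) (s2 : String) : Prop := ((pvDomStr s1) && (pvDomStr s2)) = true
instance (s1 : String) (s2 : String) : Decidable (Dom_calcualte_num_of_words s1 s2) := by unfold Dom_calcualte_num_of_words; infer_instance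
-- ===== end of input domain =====

-- B replaces A's count-dictionary with its interleaved running max by a per-character
-- count over set(s1) followed by a separate max reduction with default 0 (simpler, not faster).

-- ===== PORT A =====
-- The set(s1) initialisation loop and the counting loop only feed dict LOOKUPS, so the
-- (unmodelled) set iteration order cannot affect the result.
-- body of A's `for ch in s2` loop, on the state (max_cnt, cnt_dict)
def pvStepA (st : Int × PySem.Dict Char Int) (ch : Char) : Int × PySem.Dict Char Int :=
  let cnt := st.2.getD ch (-1)                 -- cnt = cnt_dict.get(ch, -1)
  if cnt ≠ -1 then
    let d := st.2.insert ch (cnt + 1)          -- cnt_dict[ch] += 1 (key present, value cnt)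
    let v := d.getD ch (-1)                    -- cnt_dict[ch], present
    (if st.1 < v then v else st.1, d)
  else st

def calcualte_num_of_words (s1 : String) (s2 : String) : Int :=
  let max_cnt : Int := 0
  let cnt_dict : PySem.Dict Char Int :=
    (PySem.Set.ofList s1.toList).foldl (fun d key => d.insert key 0) PySem.Dict.empty
  (s2.toList.foldl pvStepA (max_cnt, cnt_dict)).1

-- ===== PORT B =====
def calcualte_num_of_words_alt (s1 : String) (s2 : String) : Int :=
  PySem.List.maxD
    ((PySem.Set.ofList s1.toList).map
      (fun ch => ((s2.toList.filter (fun c => c == ch)).map (fun _ => (1 : Int))).sum))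
    (fun x => x) 0

-- ===== PRECONDITION & SPEC =====
def Spec_calcualte_num_of_words (s1 : String) (s2 : String) (out : Int) : Prop := out = calcualte_num_of_words_alt s1 s2
instance (s1 : String) (s2 : String) (out : Int) : Decidable (Spec_calcualte_num_of_words s1 s2 out) := by unfold Spec_calcualte_num_of_words; infer_instance

-- ===== CLAIM (what is proved, stated in full; the proofs are below) =====
def Claim_equal_calcualte_num_of_words : Prop := ∀ (s1 : String) (s2 : String), Dom_calcualte_num_of_words s1 s2 → Spec_calcualte_num_of_words s1 s2 (calcualte_num_of_words s1 s2)

-- ===== LEMMAS AND PROOFS =====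

-- the dictionary produced by A's initialisation loop, characterised by lookup
lemma getD_init_loop (l : List Char) (d : PySem.Dict Char Int) (c : Char) :
    (l.foldl (fun d k => d.insert k 0) d).getD c (-1)
      = if c ∈ l then 0 else d.getD c (-1) := by
  induction l generalizing d with
  | nil => simp
  | cons h t ih =>
    simp only [List.foldl_cons, ih, List.mem_cons, PySem.Dict.getD_insert]
    by_cases hc : c ∈ t <;> by_cases he : c = h <;> simp [hc, he]

-- pulling one argument out of a running max
lemma foldl_max_pull (L : List Int) (a x : Int) :
    L.foldl max (max a x) = max (L.foldl max a) x := by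
  induction L generalizing a with
  | nil => rfl
  | cons h t ih => simpa [max_right_comm a x h] using ih (max a h)

-- a running max over elements that never exceed the seed is the seed
lemma foldl_max_of_le (L : List Int) (m : Int) (h : ∀ y ∈ L, y ≤ m) :
    L.foldl max m = m := by
  rcases PySem.List.foldl_max_mem L m with hm | hm
  · exact hm
  · exact le_antisymm (h _ hm) (PySem.List.le_foldl_max L m).1

-- invariant of A's counting loop: the running max after l equals the max, over the
-- dictionary's keys, of stored value + occurrences in l, seeded with the current max
lemma loop_invariant (l keys : List Char) (m : Int) (d : PySem.Dict Char Int)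
    (hk : d.keys = keys)
    (hin : ∀ c ∈ keys, 0 ≤ d.getD c (-1))
    (hout : ∀ c, c ∉ keys → d.getD c (-1) = -1)
    (hm : ∀ c ∈ keys, d.getD c (-1) ≤ m) :
    (l.foldl pvStepA (m, d)).1
      = (keys.map (fun c => d.getD c (-1) + (l.count c : Int))).foldl max m := by
  induction l generalizing m d with
  | nil =>
    simp only [List.foldl_nil, List.count_nil, Int.natCast_zero, add_zero]
    exact (foldl_max_of_le _ m (by
      intro y hy
      rcases List.mem_map.1 hy with ⟨c, hc, rfl⟩
      exact hm c hc)).symm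
  | cons ch t ih =>
    by_cases hch : ch ∈ keys
    · have hcnt : d.getD ch (-1) ≠ -1 := by have := hin ch hch; omega
      have hcont : d.contains ch = true :=
        (PySem.Dict.contains_iff_mem_keys d ch).2 (hk ▸ hch)
      have hk' : (d.insert ch (d.getD ch (-1) + 1)).keys = keys := by
        rw [PySem.Dict.keys_insert_of_contains d _ hcont, hk]
      set m' : Int := if m < d.getD ch (-1) + 1 then d.getD ch (-1) + 1 else m with hm'
      have hmx : m' = max m (d.getD ch (-1) + 1) := by rw [hm', max_def]; split <;> omega
      have hstep : pvStepA (m, d) ch = (m', d.insert ch (d.getD ch (-1) + 1)) := by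
        simp only [pvStepA, hcnt, if_true, ne_eq, not_false_eq_true,
          PySem.Dict.getD_insert]
        rw [hm']
      rw [List.foldl_cons, hstep, ih m' (d.insert ch (d.getD ch (-1) + 1)) hk'
        (by intro c hc; rw [PySem.Dict.getD_insert]; split
            · have := hin ch hch; omega
            · exact hin c hc)
        (by intro c hc; rw [PySem.Dict.getD_insert, if_neg (by rintro rfl; exact hc hch)]
            exact hout c hc)
        (by intro c hc; rw [PySem.Dict.getD_insert, hmx]; split
            · exact le_max_right _ _
            · exact le_trans (hm c hc) (le_max_left _ _))]
      have hmap : keys.map (fun c => (d.insert ch (d.getD ch (-1) + 1)).getD c (-1) + (t.count c : Int))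
          = keys.map (fun c => d.getD c (-1) + ((ch :: t).count c : Int)) := by
        apply List.map_congr_left
        intro c hc
        rw [PySem.Dict.getD_insert, List.count_cons]
        by_cases he : c = ch
        · subst he
          rw [if_pos rfl, if_pos (by simp)]
          push_cast
          omega
        · rw [if_neg he, if_neg (by simpa using Ne.symm he)]
          push_cast
          omega
      rw [hmap, hmx, foldl_max_pull]
      have hmem : d.getD ch (-1) + ((ch :: t).count ch : Int)
          ∈ keys.map (fun c => d.getD c (-1) + ((ch :: t).count c : Int)) :=
        List.mem_map_of_mem hch
      have hle : d.getD ch (-1) + 1 ≤ d.getD ch (-1) + ((ch :: t).count ch : Int) := by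
        have : 1 ≤ (ch :: t).count ch := by simp
        omega
      exact max_eq_left (le_trans hle ((PySem.List.le_foldl_max _ m).2 _ hmem))
    · have hcnt : d.getD ch (-1) = -1 := hout ch hch
      have hstep : pvStepA (m, d) ch = (m, d) := by
        simp only [pvStepA, hcnt, ne_eq, not_true_eq_false, if_false]
      rw [List.foldl_cons, hstep, ih m d hk hin hout hm]
      congr 1
      apply List.map_congr_left
      intro c hc
      rw [List.count_cons, if_neg (by simp only [beq_iff_eq]; rintro rfl; exact hch hc)]
      simp

-- ===== VERDICT (by name: the statement is the Claim_ definition above) =====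
theorem calcualte_num_of_words_spec : Claim_equal_calcualte_num_of_words := by
  intro s1 s2 _
  unfold Spec_calcualte_num_of_words calcualte_num_of_words calcualte_num_of_words_alt
  set keys := PySem.Set.ofList s1.toList with hkeys
  set d0 : PySem.Dict Char Int := keys.foldl (fun d key => d.insert key (0 : Int)) PySem.Dict.empty with hd0
  have hgd : ∀ c, d0.getD c (-1) = if c ∈ keys then 0 else -1 := by
    intro c; rw [hd0, getD_init_loop]; simp
  have hk0 : d0.keys = keys := by
    rw [hd0, PySem.Dict.keys_foldl_insert, PySem.Dict.keys_empty,
      PySem.Set.update_nil_left, hkeys, PySem.Set.ofList_ofList]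
  have hA := loop_invariant s2.toList keys 0 d0 hk0
    (fun c hc => by rw [hgd]; simp [hc])
    (fun c hc => by rw [hgd]; simp [hc])
    (fun c hc => by rw [hgd]; simp [hc])
  simp only [hA]
  have hmap : keys.map (fun c => d0.getD c (-1) + (s2.toList.count c : Int))
      = keys.map (fun c => (s2.toList.count c : Int)) :=
    List.map_congr_left (fun c hc => by rw [hgd]; simp [hc])
  rw [hmap]
  have hge : ∀ ch : Char,
      ((s2.toList.filter (fun c => c == ch)).map (fun _ => (1 : Int))).sum
        = (s2.toList.count ch : Int) := by
    intro ch
    simp [List.count, List.countP_eq_length_filter]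
  have hmap2 : keys.map
      (fun ch => ((s2.toList.filter (fun c => c == ch)).map (fun _ => (1 : Int))).sum)
      = keys.map (fun c => (s2.toList.count c : Int)) :=
    List.map_congr_left (fun c _ => hge c)
  rw [hmap2]
  cases keys with
  | nil => rfl
  | cons k t =>
    rw [List.map_cons, PySem.List.maxD, PySem.List.max?_id_cons, Option.getD_some,
      List.foldl_cons, max_eq_right (by positivity)]
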